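-- pv_equiv track=rewrite | github.com/CarolChen997/public-practice | practice_0718.py | extract_txt
-- ===== SOURCE A (Python) =====
-- def extract_txt(s):
--     number_str = ''.join(c for c in s if c.isdigit() or c == '.')
--     if '.' not in number_str:
--         number_str += '.00'
--     else:
--         parts = number_str.split('.')
--         integer_part = parts[0]
--         decimal_part = parts[1][:2]  # 取小数点后两位
--         number_str = f"{integer_part}.{decimal_part}"
--
--     return number_str
-- ===== SOURCE B (Python) =====
-- def extract_txt(s):
--     # single pass state machine: phase 0 = before first '.', 1 = between first
--     # and second '.', 2 = after second '.'; digits go to the current part.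
--     integer_part = []
--     decimal_part = []
--     phase = 0
--     for c in s:
--         if c == '.':
--             if phase < 2:
--                 phase += 1
--         elif c.isdigit():
--             if phase == 0:
--                 integer_part.append(c)
--             elif phase == 1 and len(decimal_part) < 2:
--                 decimal_part.append(c)
--     if phase == 0:
--         return ''.join(integer_part) + '.00'
--     return ''.join(integer_part) + '.' + ''.join(decimal_part)
-- ===== Notes on version B (the rewrite author's own statement) =====
-- stated objective: alternative
-- what changed: Replaced the filter/join + membership test + split/slice pipeline by a single pass over the string with a three-phase state machine that accumulates the integer and (capped, between-the-first-two-dots) decimal digits directly.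
import Mathlib
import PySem

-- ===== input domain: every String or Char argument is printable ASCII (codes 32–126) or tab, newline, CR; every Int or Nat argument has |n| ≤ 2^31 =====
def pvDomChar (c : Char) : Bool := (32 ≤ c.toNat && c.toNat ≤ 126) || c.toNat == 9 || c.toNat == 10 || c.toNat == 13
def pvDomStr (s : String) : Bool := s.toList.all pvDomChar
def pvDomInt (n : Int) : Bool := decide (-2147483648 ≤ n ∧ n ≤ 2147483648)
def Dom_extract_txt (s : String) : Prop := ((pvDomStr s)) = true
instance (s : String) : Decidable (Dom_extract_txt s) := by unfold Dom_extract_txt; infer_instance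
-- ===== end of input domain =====

-- B replaces A's filter/split/slice pipeline by one three-phase scan; same values, similar cost (objective: alternative).

-- ===== PORT A =====
def extract_txt (s : String) : String :=
  -- number_str = ''.join(c for c in s if c.isdigit() or c == '.')
  let number_str : List Char :=
    PySem.Chars.join [] ((s.toList.filter (fun c => PySem.Chars.isdigit c || c == '.')).map (fun c => [c]))
  if PySem.Chars.isIn ['.'] number_str = false then
    String.ofList (number_str ++ ".00".toList)
  else
    let parts := PySem.Chars.splitOn number_str ['.']
    let integer_part := (PySem.List.pyGet? parts 0).getD []   -- parts[0]; never defaults: split yields ≥ 1 piece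
    let decimal_part := PySem.Chars.slice ((PySem.List.pyGet? parts 1).getD []) none (some 2)  -- parts[1][:2]; '.' present ⇒ ≥ 2 pieces
    String.ofList (integer_part ++ '.' :: decimal_part)

-- ===== PORT B =====
def extract_txt_step (st : List Char × List Char × Int) (c : Char) : List Char × List Char × Int :=
  let (ip, dp, phase) := st
  if c == '.' then
    if phase < 2 then (ip, dp, phase + 1) else st
  else if PySem.Chars.isdigit c then
    if phase == 0 then (ip ++ [c], dp, phase)
    else if phase == 1 && decide (dp.length < 2) then (ip, dp ++ [c], phase)
    else st
  else st

def extract_txt_alt (s : String) : String :=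
  let st := s.toList.foldl extract_txt_step ([], [], 0)
  let (ip, dp, phase) := st
  if phase == 0 then String.ofList (ip ++ ".00".toList)
  else String.ofList (ip ++ '.' :: dp)

-- ===== PRECONDITION & SPEC =====
def Spec_extract_txt (s : String) (out : String) : Prop := out = extract_txt_alt s
instance (s : String) (out : String) : Decidable (Spec_extract_txt s out) := by unfold Spec_extract_txt; infer_instance

-- ===== CLAIM (what is proved, stated in full; the proofs are below) =====
def Claim_equal_extract_txt : Prop := ∀ (s : String), Dom_extract_txt s → Spec_extract_txt s (extract_txt s)

-- ===== LEMMAS AND PROOFS =====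

-- structural characterisation of splitOn on the single-char separator '.'
def pvSod (l : List Char) : List (List Char) :=
  if h : '.' ∈ l then
    l.takeWhile (· ≠ '.') :: pvSod (l.drop ((l.takeWhile (· ≠ '.')).length + 1))
  else [l]
termination_by l.length
decreasing_by
  have hpre := List.takeWhile_prefix (l := l) (p := (· ≠ '.'))
  have hle := hpre.length_le
  have hne : l.takeWhile (· ≠ '.') ≠ l := by
    intro he
    have := List.mem_takeWhile_imp (l := l) (p := (· ≠ '.')) (by rw [he]; exact h)
    simp at this
  have hlt : (l.takeWhile (· ≠ '.')).length < l.length := by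
    rcases Nat.lt_or_ge (l.takeWhile (· ≠ '.')).length l.length with h' | h'
    · exact h'
    · exact absurd (hpre.eq_of_length (le_antisymm hle h')) hne
  simp [List.length_drop]
  omega

def pvConsPre (m : List Char) : List (List Char) → List (List Char)
  | [] => [m]
  | p :: ps => (m ++ p) :: ps

-- abbreviation for the character class both programs keep
def pvKeep (c : Char) : Bool := PySem.Chars.isdigit c || c == '.'

theorem pvConsPre_consPre (m m' : List Char) (t : List (List Char)) :
    pvConsPre m (pvConsPre m' t) = pvConsPre (m ++ m') t := by
  cases t <;> simp [pvConsPre]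

theorem pvSod_of_mem {l : List Char} (h : '.' ∈ l) :
    pvSod l = l.takeWhile (· ≠ '.') :: pvSod (l.drop ((l.takeWhile (· ≠ '.')).length + 1)) := by
  rw [pvSod, dif_pos h]

theorem pvSod_of_not_mem {l : List Char} (h : '.' ∉ l) : pvSod l = [l] := by
  rw [pvSod, dif_neg h]

theorem pvTakeWhile_of_not_mem {l : List Char} (h : '.' ∉ l) : l.takeWhile (· ≠ '.') = l :=
  List.takeWhile_eq_self_iff.mpr (by intro c hc; simp; rintro rfl; exact h hc)

theorem pvSod_dot_cons (rest : List Char) : pvSod ('.' :: rest) = [] :: pvSod rest := by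
  rw [pvSod_of_mem (List.mem_cons_self)]
  simp

theorem pvSod_cons (c : Char) (rest : List Char) (hc : c ≠ '.') :
    pvSod (c :: rest) = pvConsPre [c] (pvSod rest) := by
  by_cases h : '.' ∈ rest
  · rw [pvSod_of_mem (List.mem_cons_of_mem _ h), pvSod_of_mem h,
      List.takeWhile_cons_of_pos (by simp [hc])]
    simp [pvConsPre]
  · have hl : '.' ∉ c :: rest := by simp [h, Ne.symm hc]
    rw [pvSod_of_not_mem hl, pvSod_of_not_mem h]
    simp [pvConsPre]

theorem pvSod_ne_nil (l : List Char) : pvSod l ≠ [] := by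
  rw [pvSod]; split <;> simp

theorem pvSod_head (l : List Char) :
    (pvSod l).head? = some (l.takeWhile (· ≠ '.')) := by
  by_cases h : '.' ∈ l
  · rw [pvSod_of_mem h]; rfl
  · rw [pvSod_of_not_mem h, pvTakeWhile_of_not_mem h]; rfl

theorem pvGo_eq (fuel : Nat) (l cur : List Char) (acc : List (List Char))
    (h : l.length < fuel) :
    PySem.Chars.splitOn.go ['.'] fuel l cur acc = acc.reverse ++ pvConsPre cur.reverse (pvSod l) := by
  induction fuel generalizing l cur acc with
  | zero => omega
  | succ fuel ih =>
    cases l with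
    | nil =>
      rw [PySem.Chars.splitOn.go, pvSod_of_not_mem (by simp)]
      · simp [pvConsPre]
      · omega
    | cons c rest =>
      by_cases hc : c = '.'
      · subst hc
        rw [PySem.Chars.splitOn.go]
        simp only [List.isPrefixOf, BEq.rfl, Bool.true_and, if_true,
          List.length_singleton, List.drop_one, List.tail_cons]
        rw [ih rest [] _ (by simp at h; omega)]
        rw [pvSod_dot_cons]
        rcases hs : pvSod rest with _ | ⟨p, ps⟩
        · exact absurd hs (pvSod_ne_nil rest)
        · simp [pvConsPre]
      · rw [PySem.Chars.splitOn.go]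
        have hpre : List.isPrefixOf ['.'] (c :: rest) = false := by
          simp [List.isPrefixOf]; exact fun he => absurd he.symm hc
        rw [hpre]
        simp only [Bool.false_eq_true, if_false]
        rw [ih rest (c :: cur) acc (by simp at h; omega)]
        rw [pvSod_cons c rest hc, pvConsPre_consPre]
        simp

theorem pvSplitOn_eq_sod (l : List Char) : PySem.Chars.splitOn l ['.'] = pvSod l := by
  rw [PySem.Chars.splitOn, pvGo_eq _ _ _ _ (Nat.lt_succ_self _)]
  rcases hs : pvSod l with _ | ⟨p, ps⟩
  · exact absurd hs (pvSod_ne_nil l)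
  · simp [pvConsPre]

-- phase 2 is absorbing for B's loop
theorem pvStep2 (l : List Char) (ip dp : List Char) :
    l.foldl extract_txt_step (ip, dp, 2) = (ip, dp, 2) := by
  induction l with
  | nil => rfl
  | cons c rest ih =>
    have hstep : extract_txt_step (ip, dp, 2) c = (ip, dp, 2) := by
      simp [extract_txt_step]
    rw [List.foldl_cons, hstep, ih]

-- characters that B's loop ignores are exactly those A filters out
theorem pvStepSkip (l : List Char) (st : List Char × List Char × Int) :
    l.foldl extract_txt_step st = (l.filter pvKeep).foldl extract_txt_step st := by
  induction l generalizing st with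
  | nil => rfl
  | cons c rest ih =>
    by_cases hk : pvKeep c = true
    · rw [List.foldl_cons, List.filter_cons_of_pos hk, List.foldl_cons, ih]
    · have hd : (c == '.') = false := by
        simp [pvKeep] at hk; simp [hk.2]
      have hg : PySem.Chars.isdigit c = false := by
        simp [pvKeep] at hk; simp [hk.1]
      have hstep : extract_txt_step st c = st := by
        obtain ⟨ip, dp, ph⟩ := st
        simp [extract_txt_step, hd, hg]
      rw [List.foldl_cons, List.filter_cons_of_neg (by simp [hk]), hstep, ih]

theorem pvStep1 (l : List Char) (ip dp : List Char) (h : ∀ c ∈ l, pvKeep c = true) :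
    l.foldl extract_txt_step (ip, dp, 1) =
      (ip, dp ++ (l.takeWhile (· ≠ '.')).take (2 - dp.length),
        if '.' ∈ l then (2 : Int) else 1) := by
  induction l generalizing dp with
  | nil => simp
  | cons c rest ih =>
    by_cases hc : c = '.'
    · subst hc
      have hstep : extract_txt_step (ip, dp, 1) '.' = (ip, dp, 2) := by
        simp [extract_txt_step]
      rw [List.foldl_cons, hstep, pvStep2]
      simp
    · have hdig : PySem.Chars.isdigit c = true := by
        have := h c List.mem_cons_self
        simpa [pvKeep, hc] using this
      have hmem : ('.' ∈ c :: rest) = ('.' ∈ rest) := by simp [Ne.symm hc]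
      by_cases hlen : dp.length < 2
      · have hstep : extract_txt_step (ip, dp, 1) c = (ip, dp ++ [c], 1) := by
          simp [extract_txt_step, hc, hdig, hlen]
        rw [List.foldl_cons, hstep, ih _ (fun x hx => h x (List.mem_cons_of_mem _ hx))]
        rw [List.takeWhile_cons_of_pos (by simp [hc])]
        have harith : 2 - dp.length = (2 - (dp ++ [c]).length) + 1 := by
          simp; omega
        rw [harith, List.take_succ_cons]
        simp [hmem]
      · have hstep : extract_txt_step (ip, dp, 1) c = (ip, dp, 1) := by
          simp [extract_txt_step, hc, hdig, hlen]
        rw [List.foldl_cons, hstep, ih _ (fun x hx => h x (List.mem_cons_of_mem _ hx))]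
        have h0 : 2 - dp.length = 0 := by omega
        rw [List.takeWhile_cons_of_pos (by simp [hc])]
        simp [h0, hmem]

theorem pvStep0 (l : List Char) (ip : List Char) (h : ∀ c ∈ l, pvKeep c = true) :
    l.foldl extract_txt_step (ip, [], 0) =
      if '.' ∈ l then
        (ip ++ l.takeWhile (· ≠ '.'),
         ((l.drop ((l.takeWhile (· ≠ '.')).length + 1)).takeWhile (· ≠ '.')).take 2,
         if '.' ∈ l.drop ((l.takeWhile (· ≠ '.')).length + 1) then (2 : Int) else 1)
      else (ip ++ l, [], 0) := by
  induction l generalizing ip with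
  | nil => simp
  | cons c rest ih =>
    by_cases hc : c = '.'
    · subst hc
      have hstep : extract_txt_step (ip, [], 0) '.' = (ip, [], 1) := by
        simp [extract_txt_step]
      rw [List.foldl_cons, hstep, pvStep1 _ _ _ (fun x hx => h x (List.mem_cons_of_mem _ hx))]
      simp
    · have hdig : PySem.Chars.isdigit c = true := by
        have := h c List.mem_cons_self
        simpa [pvKeep, hc] using this
      have hstep : extract_txt_step (ip, [], 0) c = (ip ++ [c], [], 0) := by
        simp [extract_txt_step, hc, hdig]
      rw [List.foldl_cons, hstep, ih _ (fun x hx => h x (List.mem_cons_of_mem _ hx))]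
      have hmem : ('.' ∈ c :: rest) = ('.' ∈ rest) := by simp [Ne.symm hc]
      rw [List.takeWhile_cons_of_pos (by simp [hc])]
      by_cases hr : '.' ∈ rest <;> simp [hr, hmem]

theorem pvSingleton_infix (l : List Char) : (['.'] <:+: l) ↔ '.' ∈ l := by
  constructor
  · intro hi
    exact List.singleton_sublist.mp hi.sublist
  · intro hm
    obtain ⟨s, t, hst⟩ := List.append_of_mem hm
    exact ⟨s, t, by rw [hst]; simp⟩

theorem extract_txt_spec : Claim_equal_extract_txt := by
  intro s _
  unfold Spec_extract_txt extract_txt extract_txt_alt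
  rw [PySem.Chars.join_nil_singletons]
  have hfilter : s.toList.filter (fun c => PySem.Chars.isdigit c || c == '.') = s.toList.filter pvKeep := rfl
  rw [hfilter]
  set l := s.toList.filter pvKeep with hl
  have hkeep : ∀ c ∈ l, pvKeep c = true := fun c hc => (List.mem_filter.mp hc).2
  rw [pvStepSkip, ← hl, pvStep0 l [] hkeep]
  by_cases hmem : '.' ∈ l
  · have hIn : PySem.Chars.isIn ['.'] l = true := by
      rcases h' : PySem.Chars.isIn ['.'] l with _ | _
      · exact absurd ((pvSingleton_infix l).mpr hmem)
          ((PySem.Chars.isIn_eq_false_iff _ _).mp h')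
      · rfl
    rcases hs : pvSod (l.drop (((l.takeWhile (· ≠ '.'))).length + 1)) with _ | ⟨p, ps⟩
    · exact absurd hs (pvSod_ne_nil _)
    · have hp := pvSod_head (l.drop (((l.takeWhile (· ≠ '.'))).length + 1))
      rw [hs] at hp
      simp only [List.head?_cons, Option.some.injEq] at hp
      have h0 : ∀ (x y : List Char) (t : List (List Char)),
          PySem.List.pyGet? (x :: y :: t) 0 = some x := by
        intro x y t
        have hpos : (0:Int) ≤ (t.length:Int) + 1 := by positivity
        simp [PySem.List.pyGet?, PySem.List.pyIdx?, hpos]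
      have h1 : ∀ (x y : List Char) (t : List (List Char)),
          PySem.List.pyGet? (x :: y :: t) 1 = some y := by
        intro x y t
        simp [PySem.List.pyGet?, PySem.List.pyIdx?]
      have hslice : ∀ (m : List Char), PySem.Chars.slice m none (some 2) = m.take 2 := by
        intro m
        rw [PySem.Chars.slice_eq_listSlice, PySem.List.slice_to _ (by norm_num)]
        rfl
      simp only [hIn, Bool.true_eq_false, if_false, pvSplitOn_eq_sod, pvSod_of_mem hmem, hs,
        h0, h1, Option.getD_some, hslice, hmem, if_true, hp]
      by_cases hq : '.' ∈ List.drop ((List.takeWhile (fun x => !decide (x = '.')) l).length + 1) l <;>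
        simp [hq]
  · have hIn : PySem.Chars.isIn ['.'] l = false := by
      rcases h' : PySem.Chars.isIn ['.'] l with _ | _
      · rfl
      · have := (PySem.Chars.isIn_iff_infix _ _).mp h'
        exact absurd ((pvSingleton_infix l).mp this) hmem
    simp [hIn, hmem]
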